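-- pv_equiv track=rewrite | github.com/valentingoelz/AdventOfCode2024 | src/y2024/day15_2.py | handle_right
-- ===== SOURCE A (Python) =====
-- def find_robot_position(grid):
--     for y, row in enumerate(grid):
--         for x, c in enumerate(row):
--             if c == '@':
--                 return x, y
--
-- def handle_right(grid):
--     x, y = find_robot_position(grid)
--     right_objects = grid[y][x+1:]
--     for i in range(len(right_objects)):
--         if right_objects[i] == '#':
--             return grid
--         if right_objects[i] == '.':
--             row = grid[y][0:x] + "." + '@' +  right_objects[:i] + right_objects[i+1:]
--             grid[y] = row
--             return grid
--     assert False, "This should not happen"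
-- ===== SOURCE B (Python) =====
-- def _push(s):
--     # Recursively push the robot's cargo one step right: returns the suffix
--     # with the first gap consumed (boxes kept in order), or None if a wall
--     # comes before any gap.  Built back-to-front while the recursion unwinds.
--     if not s:
--         assert False, "This should not happen"
--     if s[0] == '#':
--         return None
--     if s[0] == '.':
--         return s[1:]
--     rest = _push(s[1:])
--     return None if rest is None else s[0] + rest
--
-- def handle_right(grid):
--     y, row = next((i, r) for i, r in enumerate(grid) if '@' in r)
--     x = row.index('@')
--     shifted = _push(row[x + 1:])
--     if shifted is not None:
--         grid[y] = row[:x] + '.@' + shifted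
--     return grid
-- ===== Notes on version B (the rewrite author's own statement) =====
-- stated objective: simpler
-- what changed: B replaces A's indexed for-loop with slice arithmetic (ro[:i] + ro[i+1:]) by a recursive helper that consumes the suffix after the robot and rebuilds the shifted suffix back-to-front while unwinding (gap consumed, boxes re-prepended, None on a wall), plus a generator/next search for the robot's row instead of nested enumerate scans.
import Mathlib
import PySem

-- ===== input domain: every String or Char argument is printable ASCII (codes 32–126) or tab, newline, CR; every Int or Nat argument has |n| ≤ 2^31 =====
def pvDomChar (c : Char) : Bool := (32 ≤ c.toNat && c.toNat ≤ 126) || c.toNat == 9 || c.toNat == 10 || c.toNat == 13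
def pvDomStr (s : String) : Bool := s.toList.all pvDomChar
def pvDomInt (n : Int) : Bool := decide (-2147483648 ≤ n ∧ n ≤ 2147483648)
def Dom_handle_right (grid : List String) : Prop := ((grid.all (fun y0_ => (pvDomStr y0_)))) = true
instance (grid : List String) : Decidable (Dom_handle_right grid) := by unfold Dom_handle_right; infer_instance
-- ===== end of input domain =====

-- B replaces A's indexed loop and slice arithmetic by a recursive helper that rebuilds the
-- shifted suffix back-to-front while unwinding: simpler decomposition, same cost.
-- Both Pythons mutate grid[y] in place identically; the theorems are about the return value.

-- ===== PORT A =====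
-- inner loop of find_robot_position: index of the first '@' in a row
def frpRow : List Char → Option Nat
  | [] => none
  | c :: rs => if c = '@' then some 0 else (frpRow rs).map (· + 1)

-- find_robot_position: first row (y) containing '@', with its first '@' column (x)
def frp : List String → Option (Nat × Nat)
  | [] => none
  | r :: rest =>
    match frpRow r.toList with
    | some x => some (x, 0)
    | none => (frp rest).map (fun p => (p.1, p.2 + 1))

-- the 'for i in range(len(right_objects))' loop; rest is the unscanned suffix of ro
def hrLoop (grid : List String) (rowL : List Char) (x y : Nat) (ro : List Char) :
    List Char → Nat → List String
  | [], _ => grid        -- Python: assert False (excluded by Pre_)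
  | c :: rest, i =>
    if c = '#' then grid
    else if c = '.' then
      -- grid[y] = grid[y][0:x] + "." + '@' + ro[:i] + ro[i+1:]  (x, i are Nats here, so slices are take/drop)
      grid.set y (String.ofList (rowL.take x ++ '.' :: '@' :: (ro.take i ++ ro.drop (i + 1))))
    else hrLoop grid rowL x y ro rest (i + 1)

-- body of handle_right after unpacking (x, y)
def hrBody (grid : List String) (x y : Nat) : List String :=
  let rowL := ((PySem.List.pyGet? grid (y : Int)).getD "").toList  -- grid[y]; y is in range by construction
  let ro := rowL.drop (x + 1)                                      -- grid[y][x+1:] with 0 ≤ x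
  hrLoop grid rowL x y ro ro 0

def handle_right (grid : List String) : List String :=
  match frp grid with
  | none => grid          -- Python raises TypeError here (excluded by Pre_)
  | some (x, y) => hrBody grid x y

-- ===== PORT B =====
-- _push: recursion on the suffix after the robot; gap consumed, boxes re-prepended on unwind
def pushAlt : List Char → Option (List Char)
  | [] => none            -- Python: assert False (excluded by Pre_)
  | c :: rs =>
    if c = '#' then none
    else if c = '.' then some rs
    else (pushAlt rs).map (fun r => c :: r)

-- next((i, r) for i, r in enumerate(grid) if '@' in r): the row index (row re-read by get)
def altFindRobotRow : List String → Nat → Option Nat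
  | [], _ => none
  | row :: rest, i => if PySem.Str.isIn "@" row then some i else altFindRobotRow rest (i + 1)

def handle_right_alt (grid : List String) : List String :=
  match altFindRobotRow grid 0 with
  | none => grid          -- Python: next raises StopIteration (excluded by Pre_)
  | some y =>
    let row := (PySem.List.pyGet? grid (y : Int)).getD ""  -- grid[y]; y in range by construction
    let x := PySem.Str.find row "@"                        -- row.index('@'): '@' ∈ row here, so index = find
    match pushAlt (row.toList.drop (x.toNat + 1)) with     -- row[x+1:] with 0 ≤ x
    | none => grid
    | some sh =>
      -- grid[y] = row[:x] + '.@' + shifted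
      grid.set y (String.ofList (row.toList.take x.toNat ++ '.' :: '@' :: sh))

-- ===== PRECONDITION & SPEC =====
-- Pre_ excludes exactly the inputs where Python A raises (no '@' anywhere: TypeError;
-- first robot with neither '.' nor '#' to its right in its row: AssertionError).
def preB (grid : List String) : Bool :=
  match grid.find? (fun r => r.toList.contains '@') with
  | none => false
  | some r =>
    let ro := r.toList.drop (r.toList.idxOf '@' + 1)
    ro.contains '#' || ro.contains '.'

def Pre_handle_right (grid : List String) : Prop := preB grid = true
instance (grid : List String) : Decidable (Pre_handle_right grid) := by
  unfold Pre_handle_right; infer_instance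
def pvWitness_handle_right : List String := ["#.@O."]

def Spec_handle_right (grid : List String) (out : List String) : Prop := out = handle_right_alt grid
instance (grid : List String) (out : List String) : Decidable (Spec_handle_right grid out) := by
  unfold Spec_handle_right; infer_instance

-- ===== CLAIM (what is proved, stated in full; the proofs are below) =====
def Claim_equal_handle_right : Prop := ∀ (grid : List String), Dom_handle_right grid → Pre_handle_right grid → Spec_handle_right grid (handle_right grid)

-- ===== LEMMAS AND PROOFS =====

-- single-character find.go, as a function of findIdx?
lemma go_single (c : Char) (s : List Char) :
    ∀ k : Nat, PySem.Chars.find.go [c] s k =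
      (match s.findIdx? (· = c) with
       | none => -1
       | some i => ((k + i : Nat) : Int)) := by
  induction s with
  | nil => intro k; simp [PySem.Chars.find.go]
  | cons d rs ih =>
    intro k
    rw [PySem.Chars.find.go]
    have hpre : [c].isPrefixOf (d :: rs) = (c == d) := by simp [List.isPrefixOf]
    rw [hpre, List.findIdx?_cons]
    by_cases h : d = c
    · subst h
      rw [beq_self_eq_true, show (decide (d = d)) = true from by simp]
      simp only [if_true]
      norm_num
    · have h1 : (c == d) = false := beq_eq_false_iff_ne.mpr (fun e => h e.symm)
      have h2 : (decide (d = c)) = false := decide_eq_false h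
      rw [h1, h2, ih (k + 1)]
      simp only [Bool.false_eq_true, if_false]
      cases hfi : rs.findIdx? (· = c) with
      | none => rfl
      | some i => simp only [Option.map_some]; congr 1; omega

lemma find_single (c : Char) (s : List Char) :
    PySem.Chars.find s [c] =
      (match s.findIdx? (· = c) with
       | none => -1
       | some i => (i : Int)) := by
  unfold PySem.Chars.find
  rw [go_single]
  cases s.findIdx? (· = c) <;> simp

-- A's robot-column scan is findIdx? of '@'
lemma frpRow_eq (s : List Char) : frpRow s = s.findIdx? (· = '@') := by
  induction s with
  | nil => simp [frpRow]
  | cons c rs ih =>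
    simp only [frpRow, List.findIdx?_cons, ih]
    by_cases h : c = '@' <;> simp [h]

-- characterization of A's inner loop via findIdx? of '.' and '#'
lemma hrLoop_eq (grid : List String) (rowL : List Char) (x y : Nat) (ro : List Char) :
    ∀ (rest : List Char) (i : Nat),
      hrLoop grid rowL x y ro rest i =
        (match rest.findIdx? (· = '.'), rest.findIdx? (· = '#') with
         | none, _ => grid
         | some g', some w' =>
           if w' < g' then grid
           else grid.set y (String.ofList (rowL.take x ++ '.' :: '@' ::
             (ro.take (i + g') ++ ro.drop (i + g' + 1))))
         | some g', none =>
           grid.set y (String.ofList (rowL.take x ++ '.' :: '@' ::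
             (ro.take (i + g') ++ ro.drop (i + g' + 1))))) := by
  intro rest
  induction rest with
  | nil => intro i; simp [hrLoop]
  | cons c rs ih =>
    intro i
    simp only [hrLoop, List.findIdx?_cons]
    by_cases hh : c = '#'
    · subst hh
      rw [if_pos rfl,
        show (decide ('#' = '.')) = false from rfl, show (decide ('#' = '#')) = true from rfl]
      simp only [Bool.false_eq_true, if_false, if_true]
      cases rs.findIdx? (· = '.') with
      | none => rfl
      | some g' => simp only [Option.map_some]; rw [if_pos (by omega)]
    · by_cases hd : c = '.'
      · subst hd
        rw [if_neg hh, if_pos rfl,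
          show (decide ('.' = '.')) = true from rfl, show (decide ('.' = '#')) = false from rfl]
        simp only [Bool.false_eq_true, if_false, if_true]
        cases rs.findIdx? (· = '#') with
        | none => simp
        | some w' => simp only [Option.map_some]; rw [if_neg (by omega)]; simp
      · rw [if_neg hh, if_neg hd, ih (i + 1)]
        have h1 : (decide (c = '.')) = false := decide_eq_false hd
        have h2 : (decide (c = '#')) = false := decide_eq_false hh
        rw [h1, h2]
        simp only [Bool.false_eq_true, if_false]
        cases hg : rs.findIdx? (· = '.') with
        | none => rfl
        | some g' =>
          cases hw : rs.findIdx? (· = '#') with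
          | none =>
            simp only [Option.map_some, Option.map_none]
            rw [show i + 1 + g' = i + (g' + 1) from by omega]
          | some w' =>
            simp only [Option.map_some]
            by_cases hlt : w' < g'
            · rw [if_pos hlt, if_pos (by omega : w' + 1 < g' + 1)]
            · rw [if_neg hlt, if_neg (by omega : ¬ w' + 1 < g' + 1),
                show i + 1 + g' = i + (g' + 1) from by omega]

-- characterization of B's recursive _push via findIdx? of '.' and '#'
lemma push_eq (s : List Char) :
    pushAlt s =
      (match s.findIdx? (· = '.'), s.findIdx? (· = '#') with
       | none, _ => none
       | some g', some w' =>
         if w' < g' then none else some (s.take g' ++ s.drop (g' + 1))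
       | some g', none => some (s.take g' ++ s.drop (g' + 1))) := by
  induction s with
  | nil => simp [pushAlt]
  | cons c rs ih =>
    simp only [pushAlt, List.findIdx?_cons]
    by_cases hh : c = '#'
    · subst hh
      rw [if_pos rfl,
        show (decide ('#' = '.')) = false from rfl, show (decide ('#' = '#')) = true from rfl]
      simp only [Bool.false_eq_true, if_false, if_true]
      cases rs.findIdx? (· = '.') with
      | none => rfl
      | some g' => simp only [Option.map_some]; rw [if_pos (by omega)]
    · by_cases hd : c = '.'
      · subst hd
        rw [if_neg hh, if_pos rfl,
          show (decide ('.' = '.')) = true from rfl, show (decide ('.' = '#')) = false from rfl]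
        simp only [Bool.false_eq_true, if_false, if_true]
        cases rs.findIdx? (· = '#') with
        | none => simp
        | some w' => simp only [Option.map_some]; rw [if_neg (by omega)]; simp
      · rw [if_neg hh, if_neg hd, ih]
        have h1 : (decide (c = '.')) = false := decide_eq_false hd
        have h2 : (decide (c = '#')) = false := decide_eq_false hh
        rw [h1, h2]
        simp only [Bool.false_eq_true, if_false]
        cases hg : rs.findIdx? (· = '.') with
        | none => rfl
        | some g' =>
          cases hw : rs.findIdx? (· = '#') with
          | none =>
            simp only [Option.map_some, Option.map_none, List.take_succ_cons,
              List.drop_succ_cons, List.cons_append]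
          | some w' =>
            simp only [Option.map_some]
            by_cases hlt : w' < g'
            · rw [if_pos hlt, if_pos (by omega : w' + 1 < g' + 1)]; rfl
            · rw [if_neg hlt, if_neg (by omega : ¬ w' + 1 < g' + 1)]
              simp [List.take_succ_cons, List.drop_succ_cons]

lemma findIdx?_lt_length {p : Char → Bool} {l : List Char} {i : Nat}
    (h : l.findIdx? p = some i) : i < l.length := by
  have := List.findIdx?_eq_some_iff_findIdx_eq.mp h
  omega

-- '@' ∈ row, as the Python 'in' test B makes
lemma isIn_at (row : String) :
    PySem.Str.isIn "@" row = true ↔ '@' ∈ row.toList := by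
  rw [PySem.Str.isIn_iff_infix, show ("@" : String).toList = ['@'] from rfl]
  exact List.singleton_infix_iff '@' row.toList

-- B's row search agrees with A's find_robot_position on the row index
lemma altFind_eq : ∀ (rows : List String) (i : Nat),
    altFindRobotRow rows i = (frp rows).map (fun p => i + p.2) := by
  intro rows
  induction rows with
  | nil => intro i; rfl
  | cons row rest ih =>
    intro i
    simp only [altFindRobotRow, frp, frpRow_eq]
    cases hx : row.toList.findIdx? (· = '@') with
    | none =>
      have hnm : ∀ c ∈ row.toList, ¬ c = '@' := by
        intro c hc hcq
        have := List.findIdx?_eq_none_iff.mp hx c hc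
        simp [hcq] at this
      have hni : PySem.Str.isIn "@" row = false := by
        rw [Bool.eq_false_iff]
        intro ht
        exact hnm '@' ((isIn_at row).mp ht) rfl
      rw [hni]
      simp only [Bool.false_eq_true, if_false, ih (i + 1)]
      cases hfr : frp rest with
      | none => rfl
      | some p =>
        simp only [Option.map_some]
        rw [show i + 1 + p.2 = i + (p.2 + 1) from by omega]
    | some x =>
      have hlt : x < row.toList.length := findIdx?_lt_length hx
      have h1 := List.of_findIdx?_eq_some hx
      rw [List.getElem?_eq_getElem hlt] at h1
      have hm : '@' ∈ row.toList := by
        have : row.toList[x] = '@' := by simpa using h1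
        exact this ▸ List.getElem_mem hlt
      rw [(isIn_at row).mpr hm]
      simp

-- A's find_robot_position points at a real row whose first '@' is at column x
lemma frp_row : ∀ (rows : List String) (x y : Nat), frp rows = some (x, y) →
    ∃ row, rows[y]? = some row ∧ row.toList.findIdx? (· = '@') = some x := by
  intro rows
  induction rows with
  | nil => intro x y h; simp [frp] at h
  | cons row rest ih =>
    intro x y h
    simp only [frp, frpRow_eq] at h
    cases hx : row.toList.findIdx? (· = '@') with
    | some x' =>
      rw [hx] at h
      simp only [Option.some.injEq, Prod.mk.injEq] at h
      obtain ⟨hx1, hy0⟩ := h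
      exact ⟨row, by simp [← hy0], by rw [hx, hx1]⟩
    | none =>
      rw [hx] at h
      cases hfr : frp rest with
      | none => rw [hfr] at h; simp at h
      | some p =>
        rw [hfr] at h
        simp only [Option.map_some, Option.some.injEq, Prod.mk.injEq] at h
        obtain ⟨hx1, hy1⟩ := h
        obtain ⟨row0, hrow0, hfi⟩ := ih p.1 p.2 (by rw [hfr])
        exact ⟨row0, by rw [← hy1]; simpa using hrow0, by rw [hfi, hx1]⟩

-- the two ports agree on every input (Pre_ only marks where Python A returns at all)
lemma ports_eq (grid : List String) : handle_right grid = handle_right_alt grid := by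
  rw [handle_right, handle_right_alt, altFind_eq grid 0]
  cases hfr : frp grid with
  | none => rfl
  | some p =>
    obtain ⟨x, y⟩ := p
    obtain ⟨row, hget, hx⟩ := frp_row grid x y hfr
    simp only [Option.map_some, Nat.zero_add, hrBody, PySem.List.pyGet?_natCast, hget,
      Option.getD_some, PySem.Str.find_eq, show ("@" : String).toList = ['@'] from rfl]
    rw [find_single, hx]
    simp only []
    rw [Int.toNat_natCast, hrLoop_eq, push_eq]
    cases hg : (row.toList.drop (x + 1)).findIdx? (· = '.') with
    | none => rfl
    | some g' =>
      cases hw : (row.toList.drop (x + 1)).findIdx? (· = '#') with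
      | none => simp only [Nat.zero_add]
      | some w' =>
        by_cases hlt : w' < g'
        · simp [hlt]
        · simp only [hlt, if_false, Nat.zero_add]

-- ===== VERDICT (by name: the statement is the Claim_ definition above) =====
theorem handle_right_spec : Claim_equal_handle_right := by
  intro grid _ _
  unfold Spec_handle_right
  exact ports_eq grid
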